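-- pv_equiv track=rewrite | github.com/ariuk44/retake_exam_prep | day_13.py | isCentered15
-- ===== SOURCE A (Python) =====
-- def isCentered15(arr):
--     n = len(arr)
--     for i in range(n):
--         total = 0
--         for j in range(i, n):
--             total += arr[j]
--             if total == 15:
--                 left = i
--                 right = n -j - 1
--                 if left == right:
--                     return 1
--             if total > 15:
--                 break
--     return 0
-- ===== SOURCE B (Python) =====
-- def isCentered15(arr):
--     # Prefix sums: check each symmetric (centered) window arr[i : n-i] directly.
--     n = len(arr)
--     prefix = [0]
--     for x in arr:
--         prefix.append(prefix[-1] + x)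
--     for i in range((n + 1) // 2):
--         if prefix[n - i] - prefix[i] == 15:
--             return 1
--     return 0
-- ===== Notes on version B (the rewrite author's own statement) =====
-- stated objective: faster
-- what changed: B replaces A's restart-the-sum-at-every-start double loop by one prefix-sum array and a single scan that checks each symmetric window arr[i:n-i] directly.
-- intended difference: On arrays where some centered window sums to 15 but for every such window's start an intermediate running sum exceeds 15, A's 'total > 15: break' abandons the start early and returns 0, while B returns 1, the intended answer since a centered contiguous subarray summing to 15 exists (e.g. [20, -10, 5]). — e.g. on isCentered15([20, -10, 5]): A returns 0, B returns 1
import Mathlib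
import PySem

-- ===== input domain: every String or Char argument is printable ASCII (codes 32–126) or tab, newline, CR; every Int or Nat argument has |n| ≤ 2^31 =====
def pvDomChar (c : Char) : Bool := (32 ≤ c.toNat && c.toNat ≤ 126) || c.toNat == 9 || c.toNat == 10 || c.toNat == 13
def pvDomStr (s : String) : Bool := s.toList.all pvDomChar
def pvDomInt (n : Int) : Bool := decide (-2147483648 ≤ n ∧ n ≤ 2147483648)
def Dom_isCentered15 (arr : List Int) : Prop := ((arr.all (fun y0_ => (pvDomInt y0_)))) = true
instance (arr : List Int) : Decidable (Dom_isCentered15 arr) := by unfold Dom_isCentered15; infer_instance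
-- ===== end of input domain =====

-- B: one prefix-sum array and a single scan over the symmetric windows, replacing
-- A's per-start rescans (faster, as measured); on the exceptional D_ inputs B
-- returns the intended 1 where A's early break misses the centered window.


-- ===== PORT A =====
-- inner 'for j in range(i, n)' loop with early return / break, as counted recursion
def pvAInner (arr : List Int) (i : Int) : Int → Int → Nat → Bool
  | _, _, 0 => false
  | j, total, f+1 =>
    let t := total + (PySem.List.pyGet? arr j).getD 0   -- arr[j]; always in range here
    if t = 15 ∧ i = (arr.length : Int) - j - 1 then true
    else if t > 15 then false
    else pvAInner arr i (j+1) t f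

-- outer 'for i in range(n)' loop
def pvAOuter (arr : List Int) : Int → Nat → Int
  | _, 0 => 0
  | i, f+1 =>
    if pvAInner arr i i 0 ((arr.length : Int) - i).toNat then 1
    else pvAOuter arr (i+1) f

def isCentered15 (arr : List Int) : Int := pvAOuter arr 0 arr.length

-- ===== PORT B =====
-- prefix = [0]; for x in arr: prefix.append(prefix[-1] + x)
def pvPrefix : List Int → Int → List Int
  | [], s => [s]
  | x :: xs, s => s :: pvPrefix xs (s + x)

-- 'for i in range((n + 1) // 2)' with early return 1
def pvBLoop (P : List Int) (n : Int) : Int → Nat → Int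
  | _, 0 => 0
  | i, f+1 =>
    if (PySem.List.pyGet? P (n - i)).getD 0 - (PySem.List.pyGet? P i).getD 0 = 15 then 1
    else pvBLoop P n (i+1) f

def isCentered15_alt (arr : List Int) : Int :=
  let n : Int := arr.length
  let P := pvPrefix arr 0
  pvBLoop P n 0 (PySem.Int.floordiv (n + 1) 2).toNat

-- ===== PRECONDITION & SPEC =====
-- pvS arr k = prefix sum of the first k elements; pvC arr i = 'the symmetric
-- (centered) window arr[i : n-i] sums to 15'.
-- D_ (intended difference): on arrays where some centered window sums to 15 but,
-- for every start i of such a window, some running sum arr[i]+...+arr[k-1]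
-- (k before the window's end) exceeds 15, A's 'if total > 15: break' abandons the
-- start early and A returns 0; B returns 1, the intended answer, since a centered
-- contiguous subarray summing to 15 does exist.
def pvS (arr : List Int) (k : Nat) : Int := List.sum (arr.take k)
def pvC (arr : List Int) (i : Nat) : Prop := 2*i < arr.length ∧ pvS arr (arr.length - i) - pvS arr i = 15
def D_isCentered15 (arr : List Int) : Prop :=
  (∃ i, pvC arr i) ∧ ∀ i, pvC arr i → ∃ k < arr.length - i, i < k ∧ pvS arr k - pvS arr i > 15
instance (arr : List Int) : Decidable (D_isCentered15 arr) :=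
  decidable_of_iff
    ((∃ i < arr.length, 2*i < arr.length ∧ pvS arr (arr.length - i) - pvS arr i = 15) ∧
      ∀ i < arr.length, (2*i < arr.length ∧ pvS arr (arr.length - i) - pvS arr i = 15) →
        ∃ k < arr.length - i, i < k ∧ pvS arr k - pvS arr i > 15)
    (by
      unfold D_isCentered15 pvC
      constructor
      · rintro ⟨⟨i, -, h⟩, hall⟩
        refine ⟨⟨i, h⟩, fun j hC => hall j ?_ hC⟩
        have := hC.1; omega
      · rintro ⟨⟨i, h⟩, hall⟩
        refine ⟨⟨i, ?_, h⟩, fun j _ hC => hall j hC⟩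
        have := h.1; omega)

def Spec_isCentered15 (arr : List Int) (out : Int) : Prop := ¬ D_isCentered15 arr → out = isCentered15_alt arr
instance (arr : List Int) (out : Int) : Decidable (Spec_isCentered15 arr out) := by unfold Spec_isCentered15; infer_instance

def pvDiffWitness_isCentered15 : List Int := [20, -10, 5]
def pvDiffWitnessOut_isCentered15 : Int × Int := (0, 1)

-- ===== CLAIM (what is proved, stated in full; the proofs are below) =====
def Claim_unchanged_isCentered15 : Prop := ∀ (arr : List Int), Dom_isCentered15 arr → Spec_isCentered15 arr (isCentered15 arr)
def Claim_changed_isCentered15 : Prop := Dom_isCentered15 (pvDiffWitness_isCentered15) ∧ D_isCentered15 (pvDiffWitness_isCentered15) ∧ isCentered15 (pvDiffWitness_isCentered15) = pvDiffWitnessOut_isCentered15.1 ∧ isCentered15_alt (pvDiffWitness_isCentered15) = pvDiffWitnessOut_isCentered15.2 ∧ pvDiffWitnessOut_isCentered15.1 ≠ pvDiffWitnessOut_isCentered15.2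
def Claim_exact_isCentered15 : Prop := ∀ (arr : List Int), Dom_isCentered15 arr → D_isCentered15 arr → isCentered15 arr ≠ isCentered15_alt arr

-- ===== LEMMAS AND PROOFS =====

-- A finds exactly the starts i of a centered window summing to 15 whose running
-- sums never exceed 15 before the window's end
def pvGood (arr : List Int) (i : Nat) : Prop :=
  2 * i < arr.length ∧ pvS arr (arr.length - i) - pvS arr i = 15 ∧
    ∀ k, i < k → k < arr.length - i → pvS arr k - pvS arr i ≤ 15

lemma pvS_succ (arr : List Int) (j : Nat) (h : j < arr.length) :
    pvS arr (j+1) = pvS arr j + arr[j] :=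
  List.sum_take_succ arr j h

lemma pvGet_arr (arr : List Int) (j : Nat) (h : j < arr.length) :
    (PySem.List.pyGet? arr (j : Int)).getD 0 = pvS arr (j+1) - pvS arr j := by
  rw [PySem.List.pyGet?_natCast, List.getElem?_eq_getElem h, pvS_succ arr j h]
  simp

lemma pvPrefix_get (xs : List Int) (s : Int) (k : Nat) (h : k ≤ xs.length) :
    (pvPrefix xs s)[k]? = some (s + pvS xs k) := by
  induction xs generalizing s k with
  | nil =>
    have hk : k = 0 := by simpa using h
    subst hk
    simp [pvPrefix, pvS]
  | cons x xs ih =>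
    cases k with
    | zero => simp [pvPrefix, pvS]
    | succ k =>
      simp only [pvPrefix, List.getElem?_cons_succ]
      rw [ih (s + x) k (by simpa using h)]
      simp [pvS, add_assoc]

lemma pvP_get (arr : List Int) (k : Nat) (h : k ≤ arr.length) :
    (PySem.List.pyGet? (pvPrefix arr 0) (k : Int)).getD 0 = pvS arr k := by
  rw [PySem.List.pyGet?_natCast, pvPrefix_get arr 0 k h]
  simp

-- ===== A-side characterization =====
lemma pvAInner_spec (arr : List Int) (i : Nat) :
    ∀ (f j : Nat), j + f = arr.length → i ≤ j →
      (pvAInner arr (i : Int) (j : Int) (pvS arr j - pvS arr i) f = true ↔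
        (j + i < arr.length ∧ pvS arr (arr.length - i) - pvS arr i = 15 ∧
          ∀ k, j < k → k < arr.length - i → pvS arr k - pvS arr i ≤ 15)) := by
  intro f
  induction f with
  | zero =>
    intro j hjf hij
    simp only [pvAInner, Bool.false_eq_true, false_iff]
    rintro ⟨h1, -, -⟩
    omega
  | succ f ih =>
    intro j hjf hij
    have hj : j < arr.length := by omega
    simp only [pvAInner, pvGet_arr arr j hj]
    have ht : pvS arr j - pvS arr i + (pvS arr (j+1) - pvS arr j) = pvS arr (j+1) - pvS arr i := by
      ring
    rw [ht]
    by_cases hc : pvS arr (j+1) - pvS arr i = 15 ∧ (i:Int) = (arr.length:Int) - (j:Int) - 1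
    · rw [if_pos hc]
      obtain ⟨h15, hsym⟩ := hc
      have hji : j = arr.length - 1 - i := by omega
      simp only [true_iff]
      refine ⟨by omega, ?_, ?_⟩
      · have hne : arr.length - i = j + 1 := by omega
        rw [hne]; exact h15
      · intro k hk1 hk2; omega
    · rw [if_neg hc]
      by_cases hb : pvS arr (j+1) - pvS arr i > 15
      · rw [if_pos hb]
        simp only [Bool.false_eq_true, false_iff]
        rintro ⟨hlt, h15, hall⟩
        by_cases hend : j + 1 < arr.length - i
        · have := hall (j+1) (by omega) hend; omega
        · have hne : arr.length - i = j + 1 := by omega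
          rw [hne] at h15; omega
      · rw [if_neg hb]
        have hcast : ((j:Int) + 1) = (((j+1 : Nat)) : Int) := by omega
        rw [hcast, ih (j+1) (by omega) (by omega)]
        constructor
        · rintro ⟨hlt, h15, hall⟩
          refine ⟨by omega, h15, ?_⟩
          intro k hk1 hk2
          by_cases hkj : k = j + 1
          · subst hkj; omega
          · exact hall k (by omega) hk2
        · rintro ⟨hlt, h15, hall⟩
          refine ⟨?_, h15, fun k hk1 hk2 => hall k (by omega) hk2⟩
          by_contra hge
          have hne : arr.length - i = j + 1 := by omega
          apply hc
          refine ⟨?_, by omega⟩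
          rw [hne] at h15; exact h15

lemma pvAOuter_spec (arr : List Int) :
    ∀ (f i : Nat), i + f = arr.length →
      (pvAOuter arr (i : Int) f = 1 ↔ ∃ i', i ≤ i' ∧ pvGood arr i') := by
  intro f
  induction f with
  | zero =>
    intro i hi
    simp only [pvAOuter]
    constructor
    · intro h; exact absurd h (by norm_num)
    · rintro ⟨i', h1, h2, -, -⟩
      omega
  | succ f ih =>
    intro i hi
    have hiff : (pvAInner arr (i:Int) (i:Int) 0 (((arr.length:Int) - (i:Int)).toNat) = true)
        ↔ pvGood arr i := by
      have h1 : (((arr.length:Int)) - ((i:Int))).toNat = arr.length - i := by omega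
      rw [h1]
      have h0 := pvAInner_spec arr i (arr.length - i) i (by omega) (le_refl i)
      rw [sub_self] at h0
      rw [h0]
      unfold pvGood
      constructor <;> rintro ⟨a, b, c⟩ <;> exact ⟨by omega, b, c⟩
    simp only [pvAOuter]
    by_cases hin : pvAInner arr (i:Int) (i:Int) 0 (((arr.length:Int) - (i:Int)).toNat) = true
    · rw [if_pos hin]
      constructor
      · intro _; exact ⟨i, le_refl i, hiff.mp hin⟩
      · intro _; rfl
    · rw [if_neg hin]
      have hcast : ((i:Int) + 1) = (((i+1 : Nat)) : Int) := by omega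
      rw [hcast, ih (i+1) (by omega)]
      have hni : ¬ pvGood arr i := fun hg => hin (hiff.mpr hg)
      constructor
      · rintro ⟨i', h1, h2⟩; exact ⟨i', by omega, h2⟩
      · rintro ⟨i', h1, h2⟩
        by_cases he : i' = i
        · subst he; exact absurd h2 hni
        · exact ⟨i', by omega, h2⟩

lemma pvAOuter_zero_or_one (arr : List Int) :
    ∀ (f : Nat) (i : Int), pvAOuter arr i f = 0 ∨ pvAOuter arr i f = 1 := by
  intro f
  induction f with
  | zero => intro i; left; rfl
  | succ f ih =>
    intro i
    by_cases h : pvAInner arr i i 0 ((arr.length : Int) - i).toNat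
    · right; simp [pvAOuter, h]
    · simpa [pvAOuter, h] using ih (i+1)

lemma pvA_iff (arr : List Int) : isCentered15 arr = 1 ↔ ∃ i', pvGood arr i' := by
  have h := pvAOuter_spec arr arr.length 0 (by omega)
  simp only [Nat.cast_zero] at h
  rw [isCentered15, h]
  constructor
  · rintro ⟨i', _, hg⟩; exact ⟨i', hg⟩
  · rintro ⟨i', hg⟩; exact ⟨i', Nat.zero_le _, hg⟩

-- ===== B-side characterization =====
lemma pvBLoop_spec (arr : List Int) :
    ∀ (f i : Nat), i + f = (arr.length + 1) / 2 →
      (pvBLoop (pvPrefix arr 0) (arr.length : Int) (i : Int) f = 1 ↔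
        ∃ i', i ≤ i' ∧ pvC arr i') := by
  intro f
  induction f with
  | zero =>
    intro i hi
    simp only [pvBLoop]
    constructor
    · intro h; exact absurd h (by norm_num)
    · rintro ⟨i', h1, h2, -⟩
      omega
  | succ f ih =>
    intro i hi
    have h2i : 2 * i < arr.length := by omega
    simp only [pvBLoop]
    rw [show (arr.length:Int) - (i:Int) = ((arr.length - i : Nat) : Int) by omega,
      pvP_get arr (arr.length - i) (by omega), pvP_get arr i (by omega)]
    by_cases hc : pvS arr (arr.length - i) - pvS arr i = 15
    · rw [if_pos hc]
      constructor
      · intro _; exact ⟨i, le_refl i, h2i, hc⟩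
      · intro _; rfl
    · rw [if_neg hc]
      have hcast : ((i:Int) + 1) = (((i+1 : Nat)) : Int) := by omega
      rw [hcast, ih (i+1) (by omega)]
      constructor
      · rintro ⟨i', h1, h2⟩; exact ⟨i', by omega, h2⟩
      · rintro ⟨i', h1, h2⟩
        by_cases he : i' = i
        · subst he; exact absurd h2.2 hc
        · exact ⟨i', by omega, h2⟩

lemma pvBLoop_zero_or_one (P : List Int) (n : Int) :
    ∀ (f : Nat) (i : Int), pvBLoop P n i f = 0 ∨ pvBLoop P n i f = 1 := by
  intro f
  induction f with
  | zero => intro i; left; rfl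
  | succ f ih =>
    intro i
    by_cases h : (PySem.List.pyGet? P (n - i)).getD 0 - (PySem.List.pyGet? P i).getD 0 = 15
    · right; simp [pvBLoop, h]
    · simpa [pvBLoop, h] using ih (i+1)

lemma pvB_iff (arr : List Int) : isCentered15_alt arr = 1 ↔ ∃ i', pvC arr i' := by
  simp only [isCentered15_alt]
  have hm : (PySem.Int.floordiv ((arr.length:Int) + 1) 2).toNat = (arr.length + 1) / 2 := by
    rw [PySem.Int.floordiv_eq_ediv_of_pos (by norm_num)]
    omega
  rw [hm]
  have h := pvBLoop_spec arr ((arr.length + 1) / 2) 0 (by omega)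
  simp only [Nat.cast_zero] at h
  rw [h]
  constructor
  · rintro ⟨i', -, h2⟩; exact ⟨i', h2⟩
  · rintro ⟨i', h2⟩; exact ⟨i', Nat.zero_le _, h2⟩

-- D_ restated through pvC / pvGood
lemma pvD_iff (arr : List Int) :
    D_isCentered15 arr ↔ (∃ i', pvC arr i') ∧ ¬ ∃ i', pvGood arr i' := by
  unfold D_isCentered15 pvC pvGood
  constructor
  · rintro ⟨⟨i, h1, h2⟩, hall⟩
    refine ⟨⟨i, h1, h2⟩, ?_⟩
    rintro ⟨i', hg1, hg2, hg3⟩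
    obtain ⟨k, hk1, hk2, hk3⟩ := hall i' ⟨hg1, hg2⟩
    have := hg3 k hk2 (by omega)
    omega
  · rintro ⟨⟨i, h1, h2⟩, hng⟩
    refine ⟨⟨i, h1, h2⟩, ?_⟩
    rintro i' ⟨hg1, hg2⟩
    by_contra hnb
    push Not at hnb
    refine hng ⟨i', hg1, hg2, ?_⟩
    intro k hk1 hk2
    by_contra hgt
    exact absurd hk1 (by have := hnb k (by omega) ; omega)

lemma pvA_eq_zero (arr : List Int) (h : ¬ ∃ i', pvGood arr i') : isCentered15 arr = 0 := by
  rcases pvAOuter_zero_or_one arr arr.length 0 with h0 | h1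
  · exact h0
  · exact absurd ((pvA_iff arr).mp h1) h

lemma pvB_eq_zero (arr : List Int) (h : ¬ ∃ i', pvC arr i') : isCentered15_alt arr = 0 := by
  rcases pvBLoop_zero_or_one (pvPrefix arr 0) (arr.length : Int)
      (PySem.Int.floordiv ((arr.length : Int) + 1) 2).toNat 0 with h0 | h1
  · simpa [isCentered15_alt] using h0
  · exact absurd ((pvB_iff arr).mp (by simpa [isCentered15_alt] using h1)) h

-- ===== VERDICT (by name: the statements are the Claim_ definitions above) =====
theorem isCentered15_spec : Claim_unchanged_isCentered15 := by
  intro arr _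
  unfold Spec_isCentered15
  intro hD
  rw [pvD_iff] at hD
  by_cases hG : ∃ i', pvGood arr i'
  · have hS : ∃ i', pvC arr i' := by
      obtain ⟨i', h1, h2, -⟩ := hG
      exact ⟨i', h1, h2⟩
    rw [(pvA_iff arr).mpr hG, (pvB_iff arr).mpr hS]
  · have hS : ¬ ∃ i', pvC arr i' := fun hs => hD ⟨hs, hG⟩
    rw [pvA_eq_zero arr hG, pvB_eq_zero arr hS]

theorem isCentered15_changed : Claim_changed_isCentered15 := by
  unfold Claim_changed_isCentered15; decide

theorem isCentered15_tight : Claim_exact_isCentered15 := by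
  intro arr _ hD
  rw [pvD_iff] at hD
  obtain ⟨hS, hG⟩ := hD
  rw [pvA_eq_zero arr hG, (pvB_iff arr).mpr hS]
  norm_num
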